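-- pv_equiv track=rewrite | github.com/TepidJesus/UoA-CompSci-Resources | COMP130/find_unique_letter.py | find_unique_letters
-- ===== SOURCE A (Python) =====
-- def find_unique_letters(word_a, word_b):
--     letters = []
--     for char in word_a:
--         if char not in word_b and char not in letters:
--             letters.append(char)
--         else:
--             continue
--     for char in word_b:
--         if char not in word_a and char not in letters:
--             letters.append(char)
--         else:
--             continue
--
--     letters.sort()
--     return "".join(letters)
-- ===== SOURCE B (Python) =====
-- def find_unique_letters(word_a, word_b):
--     # Count each distinct character once per word; a character in exactly
--     # one word ends with count 1, a character in both with count 2.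
--     pool = list(set(word_a)) + list(set(word_b))
--     counts = {}
--     for ch in pool:
--         counts[ch] = counts.get(ch, 0) + 1
--     return "".join(sorted(ch for ch, n in counts.items() if n == 1))
-- ===== Notes on version B (the rewrite author's own statement) =====
-- stated objective: faster
-- what changed: Replaces A's two dedup-membership loops (each char tested against the other word and the growing result list) with a single hash-based frequency count over the deduped characters of both words, keeping exactly the chars whose count is 1.
import Mathlib
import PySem

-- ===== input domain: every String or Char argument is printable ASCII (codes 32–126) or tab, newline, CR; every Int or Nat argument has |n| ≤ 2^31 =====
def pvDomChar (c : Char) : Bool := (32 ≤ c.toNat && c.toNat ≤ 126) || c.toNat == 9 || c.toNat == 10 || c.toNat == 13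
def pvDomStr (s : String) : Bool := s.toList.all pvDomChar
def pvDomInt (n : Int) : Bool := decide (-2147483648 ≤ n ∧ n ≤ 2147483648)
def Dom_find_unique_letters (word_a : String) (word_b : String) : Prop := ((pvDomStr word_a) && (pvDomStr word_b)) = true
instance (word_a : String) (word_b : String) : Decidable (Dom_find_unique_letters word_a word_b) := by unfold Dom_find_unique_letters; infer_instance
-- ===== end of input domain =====

-- B counts each distinct character once per word and keeps those counted exactly once,
-- instead of A's per-char membership tests against the other word and the growing list (idiomatic).

-- ===== PORT A =====
def find_unique_letters (word_a : String) (word_b : String) : String :=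
  String.mk (PySem.List.sorted
    (word_b.toList.foldl
      (fun ls c => if (!word_a.toList.contains c && !ls.contains c) then ls ++ [c] else ls)
      (word_a.toList.foldl
        (fun ls c => if (!word_b.toList.contains c && !ls.contains c) then ls ++ [c] else ls) []))
    (fun x => x) false)

-- ===== PORT B =====
def find_unique_letters_alt (word_a : String) (word_b : String) : String :=
  String.mk (PySem.List.sorted
    (((((PySem.Set.ofList word_a.toList ++ PySem.Set.ofList word_b.toList).foldl
          (fun d x => d.insert x (d.getD x 0 + 1)) PySem.Dict.empty).items.filter
        (fun p => p.2 == (1 : Int))).map (fun p => p.1))) (fun x => x) false)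

-- ===== PRECONDITION & SPEC =====
def Spec_find_unique_letters (word_a : String) (word_b : String) (out : String) : Prop := out = find_unique_letters_alt word_a word_b
instance (word_a : String) (word_b : String) (out : String) : Decidable (Spec_find_unique_letters word_a word_b out) := by unfold Spec_find_unique_letters; infer_instance

-- ===== CLAIM (what is proved, stated in full; the proofs are below) =====
def Claim_equal_find_unique_letters : Prop := ∀ (word_a : String) (word_b : String), Dom_find_unique_letters word_a word_b → Spec_find_unique_letters word_a word_b (find_unique_letters word_a word_b)

-- ===== LEMMAS AND PROOFS =====

-- membership in A's dedup-append loop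
theorem foldl_addUnique_mem (bl : List Char) (xs : List Char) (acc : List Char) (x : Char) :
    x ∈ xs.foldl (fun ls c => if (!bl.contains c && !ls.contains c) then ls ++ [c] else ls) acc ↔
      x ∈ acc ∨ (x ∈ xs ∧ x ∉ bl) := by
  induction xs generalizing acc with
  | nil => simp
  | cons c xs ih =>
      rw [List.foldl_cons, ih]
      by_cases hb : c ∈ bl <;> by_cases ha : c ∈ acc <;> by_cases hxc : x = c <;>
        simp [hb, ha, hxc]

-- A's loop keeps the list duplicate-free
theorem foldl_addUnique_nodup (bl : List Char) (xs : List Char) (acc : List Char)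
    (h : acc.Nodup) :
    (xs.foldl (fun ls c => if (!bl.contains c && !ls.contains c) then ls ++ [c] else ls) acc).Nodup := by
  induction xs generalizing acc with
  | nil => simpa
  | cons c xs ih =>
      rw [List.foldl_cons]
      split
      next hcond =>
        simp only [Bool.and_eq_true, Bool.not_eq_true', List.contains_eq_mem,
          decide_eq_false_iff_not] at hcond
        exact ih _ (by simp [List.nodup_append, h]; exact fun a ha he => hcond.2 (he ▸ ha))
      next => exact ih _ h

-- count of a char in a deduplicated word
theorem count_ofList (l : List Char) (c : Char) :
    (PySem.Set.ofList l).count c = if c ∈ l then 1 else 0 := by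
  by_cases h : c ∈ l
  · simp only [h, if_true]
    exact List.count_eq_one_of_mem (PySem.Set.nodup_ofList l) (by simp [PySem.Set.mem_ofList, h])
  · simp [List.count_eq_zero, PySem.Set.mem_ofList, h]

-- ===== VERDICT (by name: the statement is the Claim_ definition above) =====
theorem find_unique_letters_spec : Claim_equal_find_unique_letters := by
  intro word_a word_b _
  unfold Spec_find_unique_letters find_unique_letters find_unique_letters_alt
  rw [PySem.Dict.foldl_insert_getD_add_one_eq_counter, PySem.Dict.items_counter,
      List.filter_map, List.map_map]
  congr 1
  apply PySem.List.sorted_eq_sorted_of_perm _ _ _ (fun x y h => h)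
  rw [List.perm_ext_iff_of_nodup]
  · intro x
    rw [foldl_addUnique_mem, foldl_addUnique_mem]
    simp only [Function.comp, List.mem_map, List.mem_filter, PySem.Set.mem_ofList,
      List.mem_append, List.count_append, count_ofList, List.not_mem_nil, false_or]
    by_cases hxa : x ∈ word_a.toList <;> by_cases hxb : x ∈ word_b.toList <;>
      simp [hxa, hxb]
  · exact foldl_addUnique_nodup _ _ _ (foldl_addUnique_nodup _ _ _ List.nodup_nil)
  · have hnd : ((PySem.Set.ofList (PySem.Set.ofList word_a.toList ++ PySem.Set.ofList word_b.toList)).filter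
        (fun k => ((PySem.Set.ofList word_a.toList ++ PySem.Set.ofList word_b.toList).count k : Int) == 1)).Nodup :=
      (PySem.Set.nodup_ofList _).filter _
    exact List.Nodup.map (fun p q h => by simpa using h) hnd
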